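-- pv_equiv track=rewrite | github.com/bzitko/opj_colab | opj_v01_uvod/rjesenje_opj_v01_uvod.py | sep_text
-- ===== SOURCE A (Python) =====
-- def sep_text(txt, sep):
--     """
--     ulaz:
--     -txt: tekst
--     -sep: znak separatora
--     izlaz:
--     -lista svih podtekstova iz teksta koji se nalaze između 2 separatora
--
--     Primjer: za tekst "aaaXbbXcccXdXX" i znak separatora "X" rezultirajuća
--     lista je ['bb', 'ccc', 'd', '']
--     """
--     result = []
--     i = 0
--     while i < len(txt):
--         if txt[i] == sep:
--             j = i + 1
--             while j < len(txt):
--                 if txt[j] == sep: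
--                     result.append(txt[i+1:j])
--                     i = j - 1
--                     break
--                 j += 1
--         i += 1
--     return result
-- ===== SOURCE B (Python) =====
-- def sep_text(txt, sep):
--     pos = [k for k in range(len(txt)) if txt[k] == sep]
--     return [txt[pos[i] + 1 : pos[i + 1]] for i in range(len(pos) - 1)]
-- ===== Notes on version B (the rewrite author's own statement) =====
-- stated objective: simpler
-- what changed: B first collects all separator positions into an index list in one comprehension, then slices between each adjacent pair of positions, replacing A's nested while-loops with break and index-jumping.
import Mathlib
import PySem

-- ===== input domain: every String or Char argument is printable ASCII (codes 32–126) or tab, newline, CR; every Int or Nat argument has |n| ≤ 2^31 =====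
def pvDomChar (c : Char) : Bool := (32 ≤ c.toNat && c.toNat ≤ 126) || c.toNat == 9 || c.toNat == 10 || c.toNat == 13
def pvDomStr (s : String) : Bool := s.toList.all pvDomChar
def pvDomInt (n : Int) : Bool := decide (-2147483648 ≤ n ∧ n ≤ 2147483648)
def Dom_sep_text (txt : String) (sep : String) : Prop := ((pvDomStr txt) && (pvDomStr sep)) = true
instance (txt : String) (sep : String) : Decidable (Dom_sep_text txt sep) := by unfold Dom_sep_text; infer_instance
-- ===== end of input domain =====

-- B builds the list of separator positions first and then slices between adjacent
-- pairs, replacing A's nested while-loops with break/index-jumping (objective: simpler).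

-- ===== PORT A =====
-- inner 'while j < len(txt): if txt[j] == sep: … break; j += 1' — returns the break index
def sepInner (chars sch : List Char) (j : Nat) : Option Nat :=
  if h : j < chars.length then
    if [chars[j]] = sch then some j else sepInner chars sch (j + 1)
  else none
termination_by chars.length - j

-- termination helper for sepOuter (cited in its decreasing_by)
theorem sepInner_ge (chars sch : List Char) (s j : Nat)
    (h : sepInner chars sch s = some j) : s ≤ j := by
  fun_induction sepInner chars sch s with
  | case1 s hs hm => simp_all
  | case2 s hs hm ih =>
      exact Nat.le_of_succ_le (ih h)
  | case3 s hs => simp at h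

-- outer 'while i < len(txt)' loop; after a break Python sets i = j - 1 and then i += 1,
-- i.e. the loop resumes at i = j
def sepOuter (chars sch : List Char) (i : Nat) (acc : List String) : List String :=
  if h : i < chars.length then
    if [chars[i]] = sch then
      match h' : sepInner chars sch (i + 1) with
      | some j =>
          sepOuter chars sch j
            (acc ++ [String.mk (PySem.List.slice chars (some ((i : Int) + 1)) (some (j : Int)))])
      | none => sepOuter chars sch (i + 1) acc
    else sepOuter chars sch (i + 1) acc
  else acc
termination_by chars.length - i
decreasing_by
  · have := sepInner_ge chars sch (i + 1) j h'; omega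
  · omega
  · omega

def sep_text (txt : String) (sep : String) : List String :=
  sepOuter txt.toList sep.toList 0 []

-- ===== PORT B =====
def sep_text_alt (txt : String) (sep : String) : List String :=
  let chars := txt.toList
  let sch := sep.toList
  let pos : List Int :=
    (PySem.List.pyRange 0 (chars.length : Int) 1).filter
      (fun k => decide ([PySem.List.pyGetD chars k ' '] = sch))
  (PySem.List.pyRange 0 ((pos.length : Int) - 1) 1).map
    (fun i => String.mk (PySem.List.slice chars
        (some (PySem.List.pyGetD pos i 0 + 1))
        (some (PySem.List.pyGetD pos (i + 1) 0))))

-- ===== PRECONDITION & SPEC =====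
def Spec_sep_text (txt : String) (sep : String) (out : List String) : Prop := out = sep_text_alt txt sep
instance (txt : String) (sep : String) (out : List String) : Decidable (Spec_sep_text txt sep out) := by unfold Spec_sep_text; infer_instance

-- ===== CLAIM (what is proved, stated in full; the proofs are below) =====
def Claim_equal_sep_text : Prop := ∀ (txt : String) (sep : String), Dom_sep_text txt sep → Spec_sep_text txt sep (sep_text txt sep)

-- ===== LEMMAS AND PROOFS =====

/-- does position `k` hold the separator (Python's `txt[k] == sep`)? -/
def mAt (chars sch : List Char) (k : Nat) : Bool := decide ([chars.getD k ' '] = sch)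

/-- separator positions ≥ i, in increasing order -/
def posFrom (chars sch : List Char) (i : Nat) : List Nat :=
  (List.range' i (chars.length - i)).filter (mAt chars sch)

/-- substrings between adjacent listed positions -/
def pairs (chars : List Char) : List Nat → List String
  | a :: b :: t =>
      String.mk ((chars.drop (a + 1)).take (b - (a + 1))) :: pairs chars (b :: t)
  | _ => []

theorem posFrom_ge (chars sch : List Char) (i : Nat) (h : chars.length ≤ i) :
    posFrom chars sch i = [] := by
  simp [posFrom, Nat.sub_eq_zero_of_le h]

theorem posFrom_step (chars sch : List Char) (i : Nat) (h : i < chars.length) :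
    posFrom chars sch i =
      if mAt chars sch i then i :: posFrom chars sch (i + 1) else posFrom chars sch (i + 1) := by
  have : chars.length - i = (chars.length - (i + 1)) + 1 := by omega
  rw [posFrom, this, List.range'_succ, List.filter_cons]
  by_cases hm : mAt chars sch i <;> simp [hm, posFrom]

theorem mAt_getElem (chars sch : List Char) (i : Nat) (h : i < chars.length) :
    mAt chars sch i = decide ([chars[i]] = sch) := by
  simp [mAt, List.getD_eq_getElem?_getD, List.getElem?_eq_getElem h]

theorem sepInner_none (chars sch : List Char) (s : Nat)
    (h : sepInner chars sch s = none) : posFrom chars sch s = [] := by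
  fun_induction sepInner chars sch s with
  | case1 s hs hm => simp_all
  | case2 s hs hm ih =>
      rw [posFrom_step chars sch s hs, mAt_getElem chars sch s hs]
      simp [hm]
      exact ih h
  | case3 s hs => exact posFrom_ge chars sch s (by omega)

theorem sepInner_some (chars sch : List Char) (s j : Nat)
    (h : sepInner chars sch s = some j) :
    j < chars.length ∧ mAt chars sch j = true ∧
      posFrom chars sch s = j :: posFrom chars sch (j + 1) := by
  fun_induction sepInner chars sch s with
  | case1 s hs hm =>
      obtain rfl : s = j := by injection h
      refine ⟨hs, ?_, ?_⟩
      · rw [mAt_getElem chars sch s hs]; simpa using hm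
      · rw [posFrom_step chars sch s hs, mAt_getElem chars sch s hs]
        simp [hm]
  | case2 s hs hm ih =>
      obtain ⟨h1, h2, h3⟩ := ih h
      refine ⟨h1, h2, ?_⟩
      rw [posFrom_step chars sch s hs, mAt_getElem chars sch s hs]
      simp [hm, h3]
  | case3 s hs => simp at h

theorem slice_natCast_succ (chars : List Char) (a b : Nat) :
    PySem.List.slice chars (some ((a : Int) + 1)) (some (b : Int)) =
      (chars.drop (a + 1)).take (b - (a + 1)) := by
  have : ((a : Int) + 1) = ((a + 1 : Nat) : Int) := by push_cast; ring
  rw [this, PySem.List.slice_natCast]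

theorem sepOuter_eq (chars sch : List Char) :
    ∀ (i : Nat) (acc : List String),
      sepOuter chars sch i acc = acc ++ pairs chars (posFrom chars sch i) := by
  intro i acc
  fun_induction sepOuter chars sch i acc with
  | case1 i acc h hm j h' ih =>
    obtain ⟨hj, hmj, h3⟩ := sepInner_some chars sch (i + 1) j h'
    rw [ih, posFrom_step chars sch i h, mAt_getElem chars sch i h]
    rw [posFrom_step chars sch j hj] at *
    simp only [hm, hmj, decide_true, if_true, h3]
    rw [pairs, slice_natCast_succ]
    simp
  | case2 i acc h hm h' ih =>
    rw [ih, posFrom_step chars sch i h, mAt_getElem chars sch i h,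
      sepInner_none chars sch (i + 1) h']
    simp [hm, pairs]
  | case3 i acc h hm ih =>
    rw [ih, posFrom_step chars sch i h, mAt_getElem chars sch i h]
    simp [hm]
  | case4 i acc h =>
    simp [posFrom_ge chars sch i (by omega), pairs]

theorem sep_text_eq (txt sep : String) :
    sep_text txt sep = pairs txt.toList (posFrom txt.toList sep.toList 0) := by
  rw [sep_text, sepOuter_eq]; rfl

theorem getD_map_cast (L : List Nat) (j : Nat) :
    (L.map (Nat.cast : Nat → Int)).getD j 0 = ((L.getD j 0 : Nat) : Int) := by
  induction L generalizing j with
  | nil => simp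
  | cons a t ih =>
    cases j with
    | zero => rfl
    | succ n => rw [List.map_cons, List.getD_cons_succ, List.getD_cons_succ]; exact ih n

theorem natPairs (chars : List Char) :
    ∀ (L : List Nat) (a : Nat),
      (List.range L.length).map (fun k =>
          String.mk ((chars.drop ((a :: L).getD k 0 + 1)).take
            ((a :: L).getD (k + 1) 0 - ((a :: L).getD k 0 + 1)))) =
        pairs chars (a :: L) := by
  intro L
  induction L with
  | nil => intro a; simp [pairs]
  | cons b t ih =>
    intro a
    simp only [List.length_cons]
    rw [List.range_succ_eq_map, List.map_cons, List.map_map]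
    simp only [List.getD_cons_zero, List.getD_cons_succ]
    rw [pairs]
    congr 1
    simpa using ih b

theorem pos_eq (txt sep : String) :
    (PySem.List.pyRange 0 (txt.toList.length : Int) 1).filter
        (fun k => decide ([PySem.List.pyGetD txt.toList k ' '] = sep.toList)) =
      (posFrom txt.toList sep.toList 0).map (Nat.cast : Nat → Int) := by
  rw [PySem.List.pyRange_zero_natCast, List.filter_map]
  congr 1
  rw [posFrom]
  simp only [Nat.sub_zero]
  rw [← List.range_eq_range']
  apply List.filter_congr
  intro k _
  simp [mAt, Function.comp]

theorem altMap (chars : List Char) (L : List Nat) :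
    (PySem.List.pyRange 0 (((L.map (Nat.cast : Nat → Int)).length : Int) - 1) 1).map
      (fun i => String.mk (PySem.List.slice chars
          (some (PySem.List.pyGetD (L.map (Nat.cast : Nat → Int)) i 0 + 1))
          (some (PySem.List.pyGetD (L.map (Nat.cast : Nat → Int)) (i + 1) 0)))) =
      pairs chars L := by
  cases L with
  | nil =>
    rw [show (((([] : List Nat).map (Nat.cast : Nat → Int)).length : Int) - 1) = -1 by simp]
    rw [PySem.List.pyRange_one_eq_nil (by norm_num)]
    simp [pairs]
  | cons a M =>
    have hlen : (((((a :: M).map (Nat.cast : Nat → Int)).length : Int)) - 1) = (M.length : Nat) := by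
      simp
    rw [hlen, PySem.List.pyRange_zero_natCast, List.map_map]
    have hfun : ((fun i => String.mk (PySem.List.slice chars
          (some (PySem.List.pyGetD ((a :: M).map (Nat.cast : Nat → Int)) i 0 + 1))
          (some (PySem.List.pyGetD ((a :: M).map (Nat.cast : Nat → Int)) (i + 1) 0)))) ∘
            (Nat.cast : Nat → Int)) =
        (fun k => String.mk ((chars.drop ((a :: M).getD k 0 + 1)).take
            ((a :: M).getD (k + 1) 0 - ((a :: M).getD k 0 + 1)))) := by
      funext k
      simp only [Function.comp]
      rw [show ((k : Int) + 1) = ((k + 1 : Nat) : Int) by push_cast; ring]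
      rw [PySem.List.pyGetD_natCast, PySem.List.pyGetD_natCast,
        getD_map_cast, getD_map_cast, slice_natCast_succ]
    rw [hfun, natPairs]

theorem sep_text_alt_eq (txt sep : String) :
    sep_text_alt txt sep = pairs txt.toList (posFrom txt.toList sep.toList 0) := by
  unfold sep_text_alt
  dsimp only
  rw [pos_eq, altMap]

-- ===== VERDICT (by name: the statement is the Claim_ definition above) =====
theorem sep_text_spec : Claim_equal_sep_text := by
  intro txt sep _
  unfold Spec_sep_text
  rw [sep_text_eq, sep_text_alt_eq]
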